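-- pv_equiv track=rewrite | github.com/hwnnn/ai2thor | src/smart_llm/stages/stage3_allocation.py | _build_barriers
-- ===== SOURCE A (Python) =====
-- from collections import defaultdict, deque
-- from typing import Dict, List, Sequence
--
-- def _build_barriers(levels: Dict[str, int], subtasks: Dict[str, object]) -> List[List[str]]:
--     grouped = defaultdict(list)
--     for sid, lv in levels.items():
--         grouped[lv].append(sid)
--
--     barriers: List[List[str]] = []
--     for lv in sorted(grouped.keys()):
--         current = [sid for sid in grouped[lv] if sid in subtasks]
--         if current:
--             barriers.append(sorted(current))
--     return barriers
-- ===== SOURCE B (Python) =====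
-- def _build_barriers(levels, subtasks):
--     kept = [(sid, lv) for sid, lv in levels.items() if sid in subtasks]
--     return [sorted(sid for sid, l in kept if l == lv)
--             for lv in sorted({lv for _, lv in kept})]
-- ===== Notes on version B (the rewrite author's own statement) =====
-- stated objective: simpler
-- what changed: Replaces the defaultdict grouping with its per-bucket filter/sort and the 'if current' skip by a filter-first flat list of kept (sid, lv) pairs and one sorted-comprehension per distinct kept level, so empty levels never arise.
import Mathlib
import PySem

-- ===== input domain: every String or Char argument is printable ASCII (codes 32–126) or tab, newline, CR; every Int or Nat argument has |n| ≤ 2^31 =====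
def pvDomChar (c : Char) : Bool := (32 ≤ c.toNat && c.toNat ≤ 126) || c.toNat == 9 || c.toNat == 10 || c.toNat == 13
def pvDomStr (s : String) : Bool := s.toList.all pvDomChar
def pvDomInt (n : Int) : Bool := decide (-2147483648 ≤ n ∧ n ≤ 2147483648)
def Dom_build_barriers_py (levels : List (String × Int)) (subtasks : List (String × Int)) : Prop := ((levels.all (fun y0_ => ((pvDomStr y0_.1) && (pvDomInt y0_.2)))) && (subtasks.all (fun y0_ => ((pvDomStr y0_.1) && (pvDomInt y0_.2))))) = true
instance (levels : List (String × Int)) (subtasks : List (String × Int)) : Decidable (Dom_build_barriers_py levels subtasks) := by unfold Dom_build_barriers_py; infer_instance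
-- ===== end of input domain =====

-- B replaces A's defaultdict grouping + per-bucket sort-and-skip with a filter-first list of
-- (sid, lv) pairs and one comprehension per distinct level; same return value, no speed claim.

-- ===== PORT A =====
def build_barriers_py (levels : List (String × Int)) (subtasks : List (String × Int)) : List (List String) :=
  let S := PySem.Dict.ofList subtasks
  let grouped := (PySem.Dict.ofList levels).items.foldl
      (fun (g : PySem.Dict Int (List String)) p => g.modify p.2 [] (fun l => l ++ [p.1]))
      PySem.Dict.empty
  (PySem.List.sorted grouped.keys (fun x => x)).foldl
    (fun barriers lv =>
      let current := (grouped.getD lv []).filter (fun sid => S.contains sid)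
      if current ≠ [] then barriers ++ [PySem.List.sorted current (fun x => x)] else barriers)
    []

-- ===== PORT B =====
def build_barriers_py_alt (levels : List (String × Int)) (subtasks : List (String × Int)) : List (List String) :=
  let S := PySem.Dict.ofList subtasks
  let kept := (PySem.Dict.ofList levels).items.filter (fun p => S.contains p.1)
  (PySem.List.sorted (PySem.Set.ofList (kept.map (fun p => p.2))) (fun x => x)).map
    (fun lv => PySem.List.sorted ((kept.filter (fun p => p.2 == lv)).map (fun p => p.1)) (fun x => x))

-- ===== PRECONDITION & SPEC =====
def Spec_build_barriers_py (levels : List (String × Int)) (subtasks : List (String × Int)) (out : List (List String)) : Prop := out = build_barriers_py_alt levels subtasks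
instance (levels : List (String × Int)) (subtasks : List (String × Int)) (out : List (List String)) : Decidable (Spec_build_barriers_py levels subtasks out) := by unfold Spec_build_barriers_py; infer_instance

-- ===== CLAIM (what is proved, stated in full; the proofs are below) =====
def Claim_equal_build_barriers_py : Prop := ∀ (levels : List (String × Int)) (subtasks : List (String × Int)), Dom_build_barriers_py levels subtasks → Spec_build_barriers_py levels subtasks (build_barriers_py levels subtasks)

-- ===== LEMMAS AND PROOFS =====

theorem build_barriers_main (levels : List (String × Int)) (subtasks : List (String × Int)) :
    build_barriers_py levels subtasks = build_barriers_py_alt levels subtasks := by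
  unfold build_barriers_py build_barriers_py_alt
  set S := PySem.Dict.ofList subtasks with hS
  set items := (PySem.Dict.ofList levels).items with hitems
  set m : String → Bool := fun sid => S.contains sid with hm
  set kept := items.filter (fun p => m p.1) with hkept
  -- grouped characterisation
  set grouped := items.foldl
      (fun (g : PySem.Dict Int (List String)) p => g.modify p.2 [] (fun l => l ++ [p.1]))
      PySem.Dict.empty with hgrouped
  have hfold : grouped = (items.map (fun p => (p.2, p.1))).foldl
      (fun g q => g.modify q.1 [] (fun l => l ++ [q.2])) PySem.Dict.empty := by
    rw [List.foldl_map]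
  have hgetD : ∀ lv : Int, grouped.getD lv [] = (items.filter (fun p => p.2 == lv)).map (fun p => p.1) := by
    intro lv
    rw [hfold, PySem.Dict.getD_foldl_modify_append]
    simp [List.filter_map, Function.comp_def]
  have hkeys : grouped.keys = PySem.Set.ofList (items.map (fun p => p.2)) := by
    rw [hgrouped, PySem.Dict.keys_foldl_modify_key items (fun p => p.2) [] (fun _ p => (fun l => l ++ [p.1]))]
    simp [PySem.Set.update_nil_left]
  -- the buckets agree
  have hcur : ∀ lv : Int, (grouped.getD lv []).filter m
      = (kept.filter (fun p => p.2 == lv)).map (fun p => p.1) := by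
    intro lv
    rw [hgetD, hkept, List.filter_map, List.filter_filter, List.filter_filter]
    apply congrArg
    apply List.filter_congr
    intro p _
    simp [Function.comp, Bool.and_comm]
  -- A's final loop is a filter-map
  have hloop : (PySem.List.sorted grouped.keys (fun x => x)).foldl
      (fun barriers lv =>
        let current := (grouped.getD lv []).filter m
        if current ≠ [] then barriers ++ [PySem.List.sorted current (fun x => x)] else barriers)
      []
      = ((PySem.List.sorted grouped.keys (fun x => x)).filter
          (fun lv => decide (((grouped.getD lv []).filter m) ≠ []))).map
          (fun lv => PySem.List.sorted ((grouped.getD lv []).filter m) (fun x => x)) := by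
    rw [show (fun (barriers : List (List String)) lv =>
        let current := (grouped.getD lv []).filter m
        if current ≠ [] then barriers ++ [PySem.List.sorted current (fun x => x)] else barriers)
      = (fun barriers lv =>
        if (fun lv => decide (((grouped.getD lv []).filter m) ≠ [])) lv = true
        then barriers ++ [(fun lv => PySem.List.sorted ((grouped.getD lv []).filter m) (fun x => x)) lv]
        else barriers) from by funext b lv; simp]
    rw [PySem.List.foldl_append_if]
    simp
  rw [hloop]
  -- the level lists agree
  have hnodupA : ((PySem.List.sorted grouped.keys (fun x => x)).filter
      (fun lv => decide (((grouped.getD lv []).filter m) ≠ []))).Nodup := by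
    apply List.Nodup.filter
    exact ((PySem.List.sorted_perm grouped.keys (fun x => x) false).nodup_iff).mpr
      (by rw [hkeys]; exact PySem.Set.nodup_ofList _)
  have hmemkept : ∀ lv : Int, ((grouped.getD lv []).filter m ≠ []) ↔ lv ∈ kept.map (fun p => p.2) := by
    intro lv
    rw [hcur]
    simp only [ne_eq, List.map_eq_nil_iff, List.filter_eq_nil_iff, List.mem_map]
    push Not
    constructor
    · rintro ⟨p, hp, hlv⟩; exact ⟨p, hp, by simpa using hlv⟩
    · rintro ⟨p, hp, hlv⟩; exact ⟨p, hp, by simp [hlv]⟩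
  have hlevels : PySem.List.sorted (PySem.Set.ofList (kept.map (fun p => p.2))) (fun x => x)
      = (PySem.List.sorted grouped.keys (fun x => x)).filter
          (fun lv => decide (((grouped.getD lv []).filter m) ≠ [])) := by
    apply PySem.List.sorted_eq_of_perm_of_pairwise_lt
    · rw [List.perm_ext_iff_of_nodup hnodupA (PySem.Set.nodup_ofList _)]
      intro lv
      simp only [List.mem_filter, PySem.List.mem_sorted, PySem.Set.mem_ofList,
        decide_eq_true_eq, hmemkept lv]
      constructor
      · rintro ⟨_, h⟩; exact h
      · intro h
        refine ⟨?_, h⟩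
        rw [hkeys, PySem.Set.mem_ofList]
        rcases List.mem_map.mp h with ⟨p, hp, hlv⟩
        exact List.mem_map.mpr ⟨p, List.mem_of_mem_filter hp, hlv⟩
    · apply List.Pairwise.filter
      rw [hkeys]
      exact PySem.List.sorted_ofList_pairwise_lt _
  rw [← hlevels]
  apply List.map_congr_left
  intro lv _
  rw [hcur]

-- ===== VERDICT (by name: the statement is the Claim_ definition above) =====
theorem build_barriers_py_spec : Claim_equal_build_barriers_py := by
  intro levels subtasks _
  unfold Spec_build_barriers_py
  exact build_barriers_main levels subtasks
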